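-- pv_equiv track=rewrite | github.com/UltraSpecialException/parrot | get_data.py | assemble_data
-- ===== SOURCE A (Python) =====
-- from typing import List, Dict
--
-- def assemble_data(data: List[Dict[str, str]], target_sender: str) -> \
--         List[Dict[str, Dict[str, str]]]:
--     """
--     Assemble data into pairs of input message and expected response where the
--     messages sent by <target_sender> are the expected responses.
--     """
--     start = 0
--     if data[0]["sender_name"] == target_sender:
--         start = 1
--
--     end = len(data)
--     if len(data[start:]) % 2:
--         end = len(data) - 1
--
--     assembled_data = []
--
--     for i in range(start, end, 2):
--         input_message = data[i]
--         expected_response = data[i + 1]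
--         assembled_data.append(
--             {
--                 "input": input_message,
--                 "target": expected_response
--             }
--         )
--
--     return assembled_data
-- ===== SOURCE B (Python) =====
-- def assemble_data(data, target_sender):
--     messages = data[1:] if data[0]["sender_name"] == target_sender else data
--     it = iter(messages)
--     return [{"input": a, "target": b} for a, b in zip(it, it)]
-- ===== Notes on version B (the rewrite author's own statement) =====
-- stated objective: simpler
-- what changed: B drops A's computed end bound and parity check and its index loop range(start,end,2): after the same skip of a leading target message it pairs consecutive messages by zipping one iterator with itself, so the odd trailing message is discarded implicitly by the pairing rather than by a computed bound.
import Mathlib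
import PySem

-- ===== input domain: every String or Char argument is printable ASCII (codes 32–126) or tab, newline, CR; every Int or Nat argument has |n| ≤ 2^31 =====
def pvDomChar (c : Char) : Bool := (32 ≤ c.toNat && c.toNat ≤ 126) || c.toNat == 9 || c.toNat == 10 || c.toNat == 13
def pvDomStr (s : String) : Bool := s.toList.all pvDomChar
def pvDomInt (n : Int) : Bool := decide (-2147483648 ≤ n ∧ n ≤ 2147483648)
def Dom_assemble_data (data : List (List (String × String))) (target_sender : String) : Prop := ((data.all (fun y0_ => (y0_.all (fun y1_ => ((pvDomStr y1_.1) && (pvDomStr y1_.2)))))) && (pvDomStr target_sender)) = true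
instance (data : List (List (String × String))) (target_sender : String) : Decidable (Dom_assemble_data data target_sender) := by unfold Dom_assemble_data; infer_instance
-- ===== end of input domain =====

-- B replaces A's computed end bound / parity check and index loop by skipping a leading
-- target message and zipping one iterator with itself (the odd tail is dropped implicitly);
-- objective: simpler.


-- ===== PORT A =====
def assemble_data (data : List (List (String × String))) (target_sender : String) : List (List (String × List (String × String))) :=
  let start : Int := if PySem.Dict.getD ⟨data.headI⟩ "sender_name" "" == target_sender then 1 else 0
  let stop : Int :=
    if PySem.Int.mod ((PySem.List.slice data (some start) none).length : Int) 2 ≠ 0 then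
      (data.length : Int) - 1
    else (data.length : Int)
  (PySem.List.pyRange start stop 2).foldl
    (fun acc i =>
      acc ++ [[("input", PySem.List.pyGetD data i []), ("target", PySem.List.pyGetD data (i + 1) [])]]) []

-- ===== PORT B =====
-- zip(it, it) on one iterator = consecutive disjoint pairs, dropping an odd tail
def pairUp {α : Type} : List α → List (α × α)
  | a :: b :: t => (a, b) :: pairUp t
  | _ => []

def assemble_data_alt (data : List (List (String × String))) (target_sender : String) : List (List (String × List (String × String))) :=
  let messages := if PySem.Dict.getD ⟨data.headI⟩ "sender_name" "" == target_sender then data.tail else data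
  (pairUp messages).map (fun ab => [("input", ab.1), ("target", ab.2)])

-- ===== PRECONDITION & SPEC =====
-- Pre_ excludes exactly the inputs where the Python A raises: empty data (IndexError on
-- data[0]) and a first message without a "sender_name" key (KeyError); B raises there too.
def Pre_assemble_data (data : List (List (String × String))) (target_sender : String) : Prop :=
  data ≠ [] ∧ (PySem.Dict.get? ⟨data.headI⟩ "sender_name").isSome = true
instance (data : List (List (String × String))) (target_sender : String) : Decidable (Pre_assemble_data data target_sender) := by unfold Pre_assemble_data; infer_instance

def pvWitness_assemble_data : (List (List (String × String))) × String :=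
  ([[("sender_name", "alice"), ("content", "hi")], [("sender_name", "bob"), ("content", "yo")]], "bob")

def Spec_assemble_data (data : List (List (String × String))) (target_sender : String) (out : List (List (String × List (String × String)))) : Prop := out = assemble_data_alt data target_sender
instance (data : List (List (String × String))) (target_sender : String) (out : List (List (String × List (String × String)))) : Decidable (Spec_assemble_data data target_sender out) := by unfold Spec_assemble_data; infer_instance

-- ===== CLAIM (what is proved, stated in full; the proofs are below) =====
def Claim_equal_assemble_data : Prop := ∀ (data : List (List (String × String))) (target_sender : String), Dom_assemble_data data target_sender → Pre_assemble_data data target_sender → Spec_assemble_data data target_sender (assemble_data data target_sender)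

-- ===== LEMMAS AND PROOFS =====

lemma getD_drop {α : Type} (l : List α) (s j : Nat) (d : α) :
    (l.drop s).getD j d = l.getD (s + j) d := by
  simp [List.getD_eq_getElem?_getD, List.getElem?_drop]

lemma pairUp_eq_range {α : Type} (xs : List α) (d : α) :
    pairUp xs = (List.range (xs.length / 2)).map (fun k => (xs.getD (2 * k) d, xs.getD (2 * k + 1) d)) := by
  induction xs using pairUp.induct with
  | case1 a b t ih =>
      have hlen : (a :: b :: t).length / 2 = t.length / 2 + 1 := by simp; omega
      rw [pairUp, hlen, List.range_succ_eq_map, List.map_cons, List.map_map, ih]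
      simp [Function.comp, Nat.mul_succ]
  | case2 xs h =>
      rcases xs with _ | ⟨a, _ | ⟨b, t⟩⟩
      · simp [pairUp]
      · simp [pairUp]
      · exact absurd rfl (h a b t)

-- the common pairing, indexed from offset s into data (s = start; rest = data.drop s)
lemma main_eq (data : List (List (String × String))) (s : Nat) (hs : s ≤ data.length) :
    (PySem.List.pyRange (s : Int)
        (if PySem.Int.mod (((data.length - s : Nat) : Int)) 2 ≠ 0 then (data.length : Int) - 1 else (data.length : Int)) 2).foldl
      (fun acc i =>
        acc ++ [[("input", PySem.List.pyGetD data i []), ("target", PySem.List.pyGetD data (i + 1) [])]]) []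
    = (pairUp (data.drop s)).map (fun ab => [("input", ab.1), ("target", ab.2)]) := by
  rw [PySem.List.foldl_append_singleton_eq_map, List.nil_append,
    PySem.List.pyRange_of_pos _ _ (by norm_num), List.map_map,
    pairUp_eq_range _ [], List.map_map]
  set n := data.length with hn
  have hcnt :
      (if (s : Int) < (if PySem.Int.mod (((n - s : Nat) : Int)) 2 ≠ 0 then (n : Int) - 1 else (n : Int)) then
        (((if PySem.Int.mod (((n - s : Nat) : Int)) 2 ≠ 0 then (n : Int) - 1 else (n : Int)) - s + 2 - 1) / 2).toNat
      else 0) = (n - s) / 2 := by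
    rw [PySem.Int.mod_eq_emod_of_pos (by norm_num)]
    split_ifs with h1 h2 h3 <;> omega
  rw [hcnt]
  simp only [List.length_drop, ← hn]
  apply List.map_congr_left
  intro k hk
  have hk2 : s + 2 * k + 1 < n := by
    simp [List.mem_range] at hk; omega
  have e1 : ((s : Int) + 2 * (k : Int)).toNat = s + 2 * k := by omega
  have e2 : ((s : Int) + 2 * (k : Int) + 1).toNat = s + 2 * k + 1 := by omega
  simp only [Function.comp, PySem.List.pyGetD_of_nonneg _ _ (by omega : (0:Int) ≤ (s : Int) + 2 * (k : Int)),
    PySem.List.pyGetD_of_nonneg _ _ (by omega : (0:Int) ≤ (s : Int) + 2 * (k : Int) + 1),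
    e1, e2, getD_drop]
  ring_nf

-- ===== VERDICT (by name: the statement is the Claim_ definition above) =====
theorem assemble_data_spec : Claim_equal_assemble_data := by
  intro data target_sender _ hpre
  unfold Spec_assemble_data assemble_data assemble_data_alt
  by_cases hfirst : PySem.Dict.getD ⟨data.headI⟩ "sender_name" "" == target_sender
  · simp only [hfirst, if_pos]
    have h1 : (1 : Nat) ≤ data.length := by
      cases data with
      | nil => exact absurd rfl hpre.1
      | cons a t => simp
    have := main_eq data 1 h1
    simpa [PySem.List.slice_from_one, List.drop_one] using this
  · simp only [hfirst, Bool.false_eq_true]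
    have := main_eq data 0 (by omega)
    simpa [PySem.List.slice_none_none] using this
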